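-- pv_equiv track=rewrite | github.com/georgelepsaya/qcp-omics | src/qcp_omics/cli/cli.py | get_steps_to_run
-- ===== SOURCE A (Python) =====
-- def get_steps_to_run(validated_steps: list[int], active_steps: dict[str, list[str]]) -> list[str]:
--     steps_to_run: list[str] = []
--     step_number = 1
--     for category, steps in active_steps.items():
--         for step in steps:
--             if step_number in validated_steps:
--                 steps_to_run.append(step)
--             step_number += 1
--     return steps_to_run
-- ===== SOURCE B (Python) =====
-- def get_steps_to_run(validated_steps: list[int], active_steps: dict[str, list[str]]) -> list[str]:
--     all_steps = [step for steps in active_steps.values() for step in steps]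
--     n = len(all_steps)
--     return [all_steps[i - 1] for i in sorted(set(validated_steps)) if 1 <= i <= n]
-- ===== Notes on version B (the rewrite author's own statement) =====
-- stated objective: faster
-- what changed: Instead of scanning every step and testing 'step_number in validated_steps' (a linear scan per step), B flattens the steps once and drives from the index side: it sorts the de-duplicated validated indices and picks all_steps[i-1] for each in-range index.
import Mathlib
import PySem

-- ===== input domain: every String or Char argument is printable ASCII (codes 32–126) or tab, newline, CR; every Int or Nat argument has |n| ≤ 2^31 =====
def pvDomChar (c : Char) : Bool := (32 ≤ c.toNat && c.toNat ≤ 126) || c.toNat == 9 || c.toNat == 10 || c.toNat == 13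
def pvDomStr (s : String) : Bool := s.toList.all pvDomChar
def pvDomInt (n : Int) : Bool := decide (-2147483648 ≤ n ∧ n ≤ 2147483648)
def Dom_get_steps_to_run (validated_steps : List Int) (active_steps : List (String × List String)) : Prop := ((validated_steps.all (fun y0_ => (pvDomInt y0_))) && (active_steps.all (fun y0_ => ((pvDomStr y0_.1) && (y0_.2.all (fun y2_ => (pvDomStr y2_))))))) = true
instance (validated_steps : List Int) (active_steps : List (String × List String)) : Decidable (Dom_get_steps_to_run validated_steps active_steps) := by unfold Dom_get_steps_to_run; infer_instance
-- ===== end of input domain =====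

-- B flattens the steps once, then selects positions from the sorted de-duplicated
-- validated indices instead of testing membership for every step (faster).


-- ===== PORT A =====
def get_steps_to_run (validated_steps : List Int) (active_steps : List (String × List String)) : List String :=
  (active_steps.foldl
    (fun (st : List String × Int) cs =>
      cs.2.foldl
        (fun (st : List String × Int) step =>
          (if st.2 ∈ validated_steps then st.1 ++ [step] else st.1, st.2 + 1))
        st)
    ([], 1)).1

-- ===== PORT B =====
def get_steps_to_run_alt (validated_steps : List Int) (active_steps : List (String × List String)) : List String :=
  let all_steps := active_steps.flatMap (fun cs => cs.2)
  let n : Int := all_steps.length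
  ((PySem.List.sorted (PySem.Set.ofList validated_steps) (fun x => x) false).filter
      (fun i => decide (1 ≤ i) && decide (i ≤ n))).map
    (fun i => PySem.List.pyGetD all_steps (i - 1) "")

-- ===== PRECONDITION & SPEC =====
def Spec_get_steps_to_run (validated_steps : List Int) (active_steps : List (String × List String)) (out : List String) : Prop := out = get_steps_to_run_alt validated_steps active_steps
instance (validated_steps : List Int) (active_steps : List (String × List String)) (out : List String) : Decidable (Spec_get_steps_to_run validated_steps active_steps out) := by unfold Spec_get_steps_to_run; infer_instance

-- ===== CLAIM (what is proved, stated in full; the proofs are below) =====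
def Claim_equal_get_steps_to_run : Prop := ∀ (validated_steps : List Int) (active_steps : List (String × List String)), Dom_get_steps_to_run validated_steps active_steps → Spec_get_steps_to_run validated_steps active_steps (get_steps_to_run validated_steps active_steps)

-- ===== LEMMAS AND PROOFS =====

/-- The strings A's scan selects from `steps` when the counter starts at `n`. -/
def pick (vs : List Int) : Int → List String → List String
  | _, [] => []
  | n, x :: xs => (if n ∈ vs then [x] else []) ++ pick vs (n + 1) xs

theorem inner_foldl (vs : List Int) (steps : List String) (acc : List String) (n : Int) :
    steps.foldl
      (fun (st : List String × Int) step =>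
        (if st.2 ∈ vs then st.1 ++ [step] else st.1, st.2 + 1)) (acc, n)
      = (acc ++ pick vs n steps, n + steps.length) := by
  induction steps generalizing acc n with
  | nil => simp [pick]
  | cons x xs ih =>
      simp only [List.foldl_cons, pick, ih]
      by_cases h : n ∈ vs <;> simp [h, Prod.ext_iff, List.append_assoc] <;> omega

theorem pick_append (vs : List Int) (xs ys : List String) (n : Int) :
    pick vs n (xs ++ ys) = pick vs n xs ++ pick vs (n + xs.length) ys := by
  induction xs generalizing n with
  | nil => simp [pick]
  | cons x xs ih =>
      simp only [List.cons_append, pick, ih, List.append_assoc, List.length_cons,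
        Nat.cast_add, Nat.cast_one]
      have : n + 1 + (xs.length : Int) = n + ((xs.length : Int) + 1) := by omega
      rw [this]

theorem outer_foldl (vs : List Int) (cats : List (String × List String)) (acc : List String) (n : Int) :
    cats.foldl
      (fun (st : List String × Int) cs =>
        cs.2.foldl
          (fun (st : List String × Int) step =>
            (if st.2 ∈ vs then st.1 ++ [step] else st.1, st.2 + 1)) st) (acc, n)
      = (acc ++ pick vs n (cats.flatMap (fun cs => cs.2)), n + (cats.flatMap (fun cs => cs.2)).length) := by
  induction cats generalizing acc n with
  | nil => simp [pick]
  | cons c cs ih =>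
      simp only [List.foldl_cons, inner_foldl, ih, List.flatMap_cons, pick_append,
        List.append_assoc, List.length_append]
      simp only [Prod.mk.injEq, Nat.cast_add]
      exact ⟨trivial, by omega⟩

theorem pick_eq_range (vs : List Int) (all : List String) (n : Int) :
    pick vs n all
      = ((PySem.List.pyRange n (n + all.length) 1).filter (fun i => decide (i ∈ vs))).map
          (fun i => PySem.List.pyGetD all (i - n) "") := by
  induction all generalizing n with
  | nil => simp [pick, PySem.List.pyRange_one_eq_nil]
  | cons x xs ih =>
      have hcons : PySem.List.pyRange n (n + ((x :: xs).length : Int)) 1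
          = n :: PySem.List.pyRange (n + 1) (n + ((x :: xs).length : Int)) 1 := by
        apply PySem.List.pyRange_one_cons
        simp only [List.length_cons]; push_cast; omega
      have hend : n + ((x :: xs).length : Int) = (n + 1) + (xs.length : Int) := by
        simp only [List.length_cons]; push_cast; omega
      rw [hcons, hend, List.filter_cons]
      have htail : ((PySem.List.pyRange (n + 1) (n + 1 + (xs.length : Int)) 1).filter
              (fun i => decide (i ∈ vs))).map (fun i => PySem.List.pyGetD (x :: xs) (i - n) "")
          = ((PySem.List.pyRange (n + 1) (n + 1 + (xs.length : Int)) 1).filter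
              (fun i => decide (i ∈ vs))).map (fun i => PySem.List.pyGetD xs (i - (n + 1)) "") := by
        apply List.map_congr_left
        intro i hi
        have hi' : i ∈ PySem.List.pyRange (n + 1) (n + 1 + (xs.length : Int)) 1 :=
          List.mem_of_mem_filter hi
        have hge : n + 1 ≤ i := ((PySem.List.mem_pyRange_one).mp hi').1
        rw [PySem.List.pyGetD_of_nonneg _ _ (by omega : (0:Int) ≤ i - n),
            PySem.List.pyGetD_of_nonneg _ _ (by omega : (0:Int) ≤ i - (n + 1))]
        have : (i - n).toNat = (i - (n + 1)).toNat + 1 := by omega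
        rw [this, List.getD_cons_succ]
      by_cases h : n ∈ vs
      · rw [if_pos (by simp [h]), List.map_cons, htail]
        simp only [pick, if_pos h, ih, List.singleton_append]
        congr 1
        simp [PySem.List.pyGetD_zero_cons]
      · rw [if_neg (by simp [h]), htail]
        simp only [pick, if_neg h, ih, List.nil_append]

theorem sel_eq_range (vs : List Int) (L : Int) :
    (PySem.List.sorted (PySem.Set.ofList vs) (fun x => x) false).filter
        (fun i => decide (1 ≤ i) && decide (i ≤ L))
      = (PySem.List.pyRange 1 (1 + L) 1).filter (fun i => decide (i ∈ vs)) := by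
  set X := (PySem.List.sorted (PySem.Set.ofList vs) (fun x => x) false).filter
      (fun i => decide (1 ≤ i) && decide (i ≤ L)) with hX
  set Y := (PySem.List.pyRange 1 (1 + L) 1).filter (fun i => decide (i ∈ vs)) with hY
  have hXlt : X.Pairwise (· < ·) :=
    List.Pairwise.filter _ (PySem.List.sorted_ofList_pairwise_lt vs)
  have hYlt : Y.Pairwise (· < ·) :=
    List.Pairwise.filter _ (PySem.List.pairwise_lt_pyRange_one 1 (1 + L))
  have hXnd : X.Nodup := hXlt.imp (fun h => ne_of_lt h)
  have hYnd : Y.Nodup := hYlt.imp (fun h => ne_of_lt h)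
  have hmem : ∀ a : Int, a ∈ X ↔ a ∈ Y := by
    intro a
    simp only [hX, hY, List.mem_filter, PySem.List.mem_sorted, PySem.Set.mem_ofList,
      PySem.List.mem_pyRange_one, Bool.and_eq_true, decide_eq_true_eq]
    constructor
    · rintro ⟨ha, h1, h2⟩; exact ⟨⟨h1, by omega⟩, ha⟩
    · rintro ⟨⟨h1, h2⟩, ha⟩; exact ⟨ha, h1, by omega⟩
  have hperm : X.Perm Y := (List.perm_ext_iff_of_nodup hXnd hYnd).mpr hmem
  exact List.Perm.eq_of_pairwise
    (fun a b _ _ h1 h2 => absurd h2 (not_lt.mpr h1.le)) hXlt hYlt hperm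

theorem get_steps_to_run_spec : Claim_equal_get_steps_to_run := by
  intro vs as _
  unfold Spec_get_steps_to_run get_steps_to_run get_steps_to_run_alt
  rw [outer_foldl]
  simp only [List.nil_append]
  rw [pick_eq_range, sel_eq_range vs ((as.flatMap (fun cs => cs.2)).length : Int)]
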